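-- pv_equiv track=rewrite | github.com/Grog4r/adventofcode2025 | day2/main_part1.py | find_invalid_ids
-- ===== SOURCE A (Python) =====
-- def find_invalid_ids(range_start: int, range_end: int) -> list[int]:
--     invalid_ids = []
--     for candidate in range(range_start, range_end + 1):
--         candidate_str = str(candidate)
--         candidate_split = len(candidate_str) // 2
--         part_a = candidate_str[0:candidate_split]
--         part_b = candidate_str[candidate_split:]
--         if part_a == part_b:
--             invalid_ids.append(candidate)
--     return invalid_ids
-- ===== SOURCE B (Python) =====
-- def find_invalid_ids(range_start: int, range_end: int) -> list[int]:
--     # Generate doubled numbers n*(10**k+1) directly, per half-length k,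
--     # instead of scanning every candidate in the range.
--     result = []
--     k = 1
--     while 10 ** (2 * k - 1) <= range_end:
--         p = 10 ** k + 1
--         lo = max(10 ** (k - 1), -(-range_start // p))
--         hi = min(10 ** k - 1, range_end // p)
--         result += [n * p for n in range(lo, hi + 1)]
--         k += 1
--     return result
-- ===== Notes on version B (the rewrite author's own statement) =====
-- stated objective: faster
-- what changed: Instead of scanning every candidate in [start, end] and comparing the string halves, B directly generates the doubled numbers n*(10^k+1) for each half-length k, clamping n to the k-digit numbers whose product lies in the range.
import Mathlib
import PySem

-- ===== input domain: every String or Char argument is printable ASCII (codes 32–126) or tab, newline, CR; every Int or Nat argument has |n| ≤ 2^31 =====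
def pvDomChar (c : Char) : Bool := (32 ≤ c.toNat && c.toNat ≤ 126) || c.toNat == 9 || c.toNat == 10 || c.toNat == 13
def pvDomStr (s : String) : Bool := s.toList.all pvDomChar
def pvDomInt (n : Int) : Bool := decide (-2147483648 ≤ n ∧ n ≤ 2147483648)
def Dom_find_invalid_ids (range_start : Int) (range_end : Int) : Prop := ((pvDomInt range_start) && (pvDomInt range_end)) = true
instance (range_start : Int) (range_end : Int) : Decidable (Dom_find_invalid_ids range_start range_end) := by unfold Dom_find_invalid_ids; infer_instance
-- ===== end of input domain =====

-- B is faster: instead of scanning every candidate and comparing string halves, it generates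
-- the doubled numbers n*(10^k+1) per half-length k directly (measured asymptotically faster).

-- ===== PORT A =====
def find_invalid_ids (range_start : Int) (range_end : Int) : List Int :=
  (PySem.List.pyRange range_start (range_end + 1)).foldl
    (fun invalid_ids candidate =>
      let candidate_str := PySem.Int.toChars candidate
      let candidate_split : Int := PySem.Int.floordiv (candidate_str.length : Int) 2
      let part_a := PySem.List.slice candidate_str (some 0) (some candidate_split)
      let part_b := PySem.List.slice candidate_str (some candidate_split) none
      if part_a = part_b then invalid_ids ++ [candidate] else invalid_ids)
    []

-- ===== PORT B =====
-- the while-loop of Source B: k advances while 10^(2k-1) ≤ range_end, appending the k-block to result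
def pvAltLoop (range_start : Int) (range_end : Int) (k : Nat) (result : List Int) : List Int :=
  if _h : (10 : Int) ^ (2 * k - 1) ≤ range_end then
    let p : Int := 10 ^ k + 1
    let lo : Int := max ((10 : Int) ^ (k - 1)) (-(PySem.Int.floordiv (-range_start) p))
    let hi : Int := min ((10 : Int) ^ k - 1) (PySem.Int.floordiv range_end p)
    pvAltLoop range_start range_end (k + 1)
      (result ++ (PySem.List.pyRange lo (hi + 1)).map (fun n => n * p))
  else result
termination_by (range_end + 1 - 10 ^ (2 * k - 1)).toNat
decreasing_by
  have h1 : (10 : Int) ^ (2 * k - 1) < 10 ^ (2 * (k + 1) - 1) :=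
    pow_lt_pow_right₀ (by norm_num) (by omega)
  omega

def find_invalid_ids_alt (range_start : Int) (range_end : Int) : List Int :=
  pvAltLoop range_start range_end 1 []

-- ===== PRECONDITION & SPEC =====
def Spec_find_invalid_ids (range_start : Int) (range_end : Int) (out : List Int) : Prop := out = find_invalid_ids_alt range_start range_end
instance (range_start : Int) (range_end : Int) (out : List Int) : Decidable (Spec_find_invalid_ids range_start range_end out) := by unfold Spec_find_invalid_ids; infer_instance

-- ===== CLAIM (what is proved, stated in full; the proofs are below) =====
def Claim_equal_find_invalid_ids : Prop := ∀ (range_start : Int) (range_end : Int), Dom_find_invalid_ids range_start range_end → Spec_find_invalid_ids range_start range_end (find_invalid_ids range_start range_end)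

-- ===== LEMMAS AND PROOFS =====

-- A's per-candidate test, as a Bool predicate
def predA (c : Int) : Bool :=
  decide (PySem.List.slice (PySem.Int.toChars c) (some 0)
      (some (PySem.Int.floordiv ((PySem.Int.toChars c).length : Int) 2)) =
    PySem.List.slice (PySem.Int.toChars c)
      (some (PySem.Int.floordiv ((PySem.Int.toChars c).length : Int) 2)) none)

-- the numbers A keeps: a k-digit number doubled
def isDouble (c : Int) : Prop :=
  ∃ k n : ℕ, 1 ≤ k ∧ 10 ^ (k - 1) ≤ n ∧ n < 10 ^ k ∧ c = (n : Int) * ((10 : Int) ^ k + 1)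

-- acc-free version of pvAltLoop, for the proofs
def altList (range_start : Int) (range_end : Int) (k : Nat) : List Int :=
  if _h : (10 : Int) ^ (2 * k - 1) ≤ range_end then
    let p : Int := 10 ^ k + 1
    let lo : Int := max ((10 : Int) ^ (k - 1)) (-(PySem.Int.floordiv (-range_start) p))
    let hi : Int := min ((10 : Int) ^ k - 1) (PySem.Int.floordiv range_end p)
    ((PySem.List.pyRange lo (hi + 1)).map (fun n => n * p)) ++ altList range_start range_end (k + 1)
  else []
termination_by (range_end + 1 - 10 ^ (2 * k - 1)).toNat
decreasing_by
  have h1 : (10 : Int) ^ (2 * k - 1) < 10 ^ (2 * (k + 1) - 1) :=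
    pow_lt_pow_right₀ (by norm_num) (by omega)
  omega

theorem pvAltLoop_eq_altList (s e : Int) (k : Nat) (acc : List Int) :
    pvAltLoop s e k acc = acc ++ altList s e k := by
  fun_induction pvAltLoop s e k acc with
  | case1 k acc h p lo hi ih =>
    conv_rhs => rw [altList]
    rw [ih, dif_pos h, List.append_assoc]
  | case2 k acc h =>
    conv_rhs => rw [altList]
    rw [dif_neg h, List.append_nil]

theorem A_eq_filter (s e : Int) :
    find_invalid_ids s e = (PySem.List.pyRange s (e + 1)).filter predA := by
  unfold find_invalid_ids
  have h : (fun (invalid_ids : List Int) (candidate : Int) =>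
      let candidate_str := PySem.Int.toChars candidate
      let candidate_split : Int := PySem.Int.floordiv (candidate_str.length : Int) 2
      let part_a := PySem.List.slice candidate_str (some 0) (some candidate_split)
      let part_b := PySem.List.slice candidate_str (some candidate_split) none
      if part_a = part_b then invalid_ids ++ [candidate] else invalid_ids)
      = (fun acc c => if predA c = true then acc ++ [id c] else acc) := by
    funext acc c
    simp [predA]
  rw [h, PySem.List.foldl_append_if, List.map_id, List.nil_append]

-- take/drop halves lemma
theorem take_drop_half_iff {α : Type} (l : List α) :
    l.take (l.length / 2) = l.drop (l.length / 2) ↔ ∃ t, l = t ++ t := by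
  constructor
  · intro h
    refine ⟨l.take (l.length / 2), ?_⟩
    conv_lhs => rw [← List.take_append_drop (l.length / 2) l]
    rw [h]
  · rintro ⟨t, rfl⟩
    have hlen : (t ++ t).length / 2 = t.length := by simp; omega
    rw [hlen, List.take_left' rfl, List.drop_left' rfl]

theorem predA_iff_take_drop (c : Int) :
    predA c = true ↔
      (PySem.Int.toChars c).take ((PySem.Int.toChars c).length / 2) =
        (PySem.Int.toChars c).drop ((PySem.Int.toChars c).length / 2) := by
  have h2 : PySem.Int.floordiv ((PySem.Int.toChars c).length : Int) 2
      = (((PySem.Int.toChars c).length / 2 : Nat) : Int) := by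
    exact_mod_cast PySem.Int.floordiv_natCast (PySem.Int.toChars c).length 2
  rw [predA, h2, decide_eq_true_eq, PySem.List.slice_zero_start,
    PySem.List.slice_to_natCast, PySem.List.slice_from_natCast]

theorem toDigitsCore10 : ∀ (f m : ℕ) (acc : List Char), 0 < m → m < f →
    Nat.toDigitsCore 10 f m acc = ((Nat.digits 10 m).map Nat.digitChar).reverse ++ acc := by
  intro f
  induction f with
  | zero => intro m acc h1 h2; omega
  | succ f ih =>
    intro m acc h1 h2
    rw [Nat.toDigitsCore]
    by_cases h : m / 10 = 0
    · rw [if_pos h, Nat.digits_def' (by norm_num) h1, h, Nat.digits_zero]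
      simp
    · rw [if_neg h, ih (m / 10) _ (by omega) (by omega),
        Nat.digits_def' (by norm_num : (1:ℕ) < 10) h1]
      simp

theorem toDigits10 (m : ℕ) (h : 0 < m) :
    Nat.toDigits 10 m = ((Nat.digits 10 m).map Nat.digitChar).reverse := by
  rw [Nat.toDigits, toDigitsCore10 (m + 1) m [] h (by omega), List.append_nil]

theorem digitChar_inj : ∀ x : ℕ, x < 10 → ∀ y : ℕ, y < 10 →
    Nat.digitChar x = Nat.digitChar y → x = y := by decide

theorem digitChar_ne_dash : ∀ x : ℕ, x < 10 → Nat.digitChar x ≠ '-' := by decide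

theorem map_digitChar_inj (a b : List ℕ) (ha : ∀ x ∈ a, x < 10) (hb : ∀ x ∈ b, x < 10)
    (h : a.map Nat.digitChar = b.map Nat.digitChar) : a = b := by
  induction a generalizing b with
  | nil => cases b <;> simp_all
  | cons x a ih =>
    cases b with
    | nil => simp_all
    | cons y b =>
      simp only [List.map_cons, List.cons.injEq] at h
      have hx := digitChar_inj x (ha x (by simp)) y (hb y (by simp)) h.1
      rw [hx, ih b (fun z hz => ha z (by simp [hz])) (fun z hz => hb z (by simp [hz])) h.2]

-- double-list at the digit level ↔ double-list at the char level
theorem rev_map_double_iff (D : List ℕ) (hD : ∀ x ∈ D, x < 10) :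
    (∃ t, (D.map Nat.digitChar).reverse = t ++ t) ↔ ∃ u, D = u ++ u := by
  constructor
  · rintro ⟨t, ht⟩
    rw [← List.map_reverse] at ht
    have hlen : D.reverse.length = t.length + t.length := by
      have := congrArg List.length ht; simpa using this
    have h1 : (D.reverse.take t.length).map Nat.digitChar = t := by
      rw [List.map_take, ht, List.take_left' rfl]
    have h2 : (D.reverse.drop t.length).map Nat.digitChar = t := by
      rw [List.map_drop, ht, List.drop_left' rfl]
    have h3 : D.reverse.take t.length = D.reverse.drop t.length := by
      refine map_digitChar_inj _ _ (fun z hz => hD z ?_) (fun z hz => hD z ?_) (h1.trans h2.symm)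
      · exact List.mem_reverse.mp (List.mem_of_mem_take hz)
      · exact List.mem_reverse.mp (List.mem_of_mem_drop hz)
    refine ⟨(D.reverse.take t.length).reverse, ?_⟩
    have h4 : D.reverse = D.reverse.take t.length ++ D.reverse.take t.length := by
      conv_lhs => rw [← List.take_append_drop t.length D.reverse]
      rw [h3]
    calc D = D.reverse.reverse := by simp
    _ = (D.reverse.take t.length).reverse ++ (D.reverse.take t.length).reverse := by
          conv_lhs => rw [h4]
          simp
  · rintro ⟨u, rfl⟩
    exact ⟨(u.map Nat.digitChar).reverse, by simp⟩


theorem getLast_double {l l' : List ℕ} (h : l = l' ++ l') (hne : l ≠ [])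
    (hne2 : l' ≠ []) (hz : l.getLast hne ≠ 0) : l'.getLast hne2 ≠ 0 := by
  have h2 : l.getLast hne = l'.getLast hne2 := by
    simp only [h, List.getLast_append]
    rw [dif_neg (by simpa using hne2)]
  rwa [h2] at hz

theorem digits_double_iff (m : ℕ) (hm : 0 < m) :
    (∃ u, Nat.digits 10 m = u ++ u) ↔ isDouble (m : Int) := by
  constructor
  · rintro ⟨u, hu⟩
    have hdm : Nat.digits 10 m ≠ [] := Nat.digits_ne_nil_iff_ne_zero.mpr (by omega)
    have hune : u ≠ [] := by
      intro h
      rw [h] at hu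
      exact hdm (by simpa using hu)
    have hlt : ∀ x ∈ u, x < 10 := by
      intro x hx
      exact Nat.digits_lt_base (by norm_num) (by rw [hu]; exact List.mem_append_left _ hx)
    have hlast : ∀ (h : u ≠ []), u.getLast h ≠ 0 := fun h =>
      getLast_double hu hdm h (Nat.getLast_digit_ne_zero 10 (by omega))
    set n := Nat.ofDigits 10 u with hn
    set k := u.length with hk
    have hdig : Nat.digits 10 n = u := Nat.digits_ofDigits 10 (by norm_num) u hlt hlast
    have hkpos : 1 ≤ k := by
      cases u with | nil => exact absurd rfl hune | cons a l => simp [hk]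
    have hm_eq : m = n * (10 ^ k + 1) := by
      conv_lhs => rw [← Nat.ofDigits_digits 10 m, hu, Nat.ofDigits_append]
      ring
    have hnlt : n < 10 ^ k := by
      have := Nat.lt_base_pow_length_digits (b := 10) (m := n) (by norm_num)
      rwa [hdig] at this
    have hne : n ≠ 0 := by
      intro h
      rw [h, Nat.digits_zero] at hdig
      exact hune hdig.symm
    have hnge : 10 ^ (k - 1) ≤ n := by
      have h10 := Nat.base_pow_length_digits_le 10 n (by norm_num) hne
      rw [hdig] at h10
      rw [← hk] at h10
      have hsplit : 10 ^ k = 10 * 10 ^ (k - 1) := by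
        rw [← pow_succ']
        congr 1
        omega
      omega
    exact ⟨k, n, hkpos, hnge, hnlt, by push_cast [hm_eq]; ring⟩
  · rintro ⟨k, n, hk, hlo, hhi, hc⟩
    have hm_eq : m = n * (10 ^ k + 1) := by
      have : (m : Int) = ((n * (10 ^ k + 1) : ℕ) : Int) := by push_cast; linarith [hc]
      exact_mod_cast this
    have hne : n ≠ 0 := by
      have : 0 < 10 ^ (k - 1) := Nat.pow_pos (by norm_num)
      omega
    set v := Nat.digits 10 n with hv
    have hvne : v ≠ [] := Nat.digits_ne_nil_iff_ne_zero.mpr hne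
    have hvlen : v.length = k := by
      rw [hv, Nat.length_digits 10 n (by norm_num) hne]
      have hlog : Nat.log 10 n = k - 1 := by
        apply Nat.log_eq_of_pow_le_of_lt_pow hlo
        have h1 : k - 1 + 1 = k := by omega
        rwa [h1]
      omega
    refine ⟨v, ?_⟩
    have hvlt : ∀ x ∈ v ++ v, x < 10 := by
      intro x hx
      rcases List.mem_append.mp hx with h | h <;> exact Nat.digits_lt_base (by norm_num) h
    have hvlast : ∀ (h : v ++ v ≠ []), (v ++ v).getLast h ≠ 0 := by
      intro h
      have h2 : (v ++ v).getLast h = v.getLast hvne := by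
        simp only [List.getLast_append]
        rw [dif_neg (by simpa using hvne)]
      rw [h2]
      exact Nat.getLast_digit_ne_zero 10 hne
    have hd := Nat.digits_ofDigits 10 (by norm_num) (v ++ v) hvlt hvlast
    rw [Nat.ofDigits_append, Nat.ofDigits_digits, hvlen] at hd
    rw [hm_eq, ← hd]
    congr 1
    ring

theorem isDouble_pos {c : Int} (h : isDouble c) : 0 < c := by
  obtain ⟨k, n, hk, hlo, hhi, hc⟩ := h
  have h1 : 1 ≤ n := le_trans (Nat.one_le_pow _ _ (by norm_num)) hlo
  have h2 : (1 : Int) ≤ (n : Int) := by exact_mod_cast h1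
  have h3 : (0 : Int) < 10 ^ k + 1 := by positivity
  nlinarith

theorem predA_iff_isDouble (c : Int) : predA c = true ↔ isDouble c := by
  rw [predA_iff_take_drop, take_drop_half_iff]
  rcases lt_trichotomy c 0 with hneg | rfl | hpos
  · constructor
    · rintro ⟨t, ht⟩
      exfalso
      have hpos' : 0 < c.natAbs := by omega
      have hcs : PySem.Int.toChars c = '-' :: Nat.toDigits 10 c.natAbs := by
        rw [PySem.Int.toChars, if_pos hneg]
      rw [hcs, toDigits10 _ hpos'] at ht
      cases t with
      | nil => simp at ht
      | cons a t' =>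
        rw [List.cons_append, List.cons.injEq] at ht
        obtain ⟨rfl, hds⟩ := ht
        have hmem : '-' ∈ ((Nat.digits 10 c.natAbs).map Nat.digitChar).reverse := by
          rw [hds]
          exact List.mem_append_right _ (by simp)
        rw [List.mem_reverse, List.mem_map] at hmem
        obtain ⟨d, hd, hdc⟩ := hmem
        exact digitChar_ne_dash d (Nat.digits_lt_base (by norm_num) hd) hdc
    · intro h
      exact absurd (isDouble_pos h) (by omega)
  · constructor
    · rintro ⟨t, ht⟩
      have : (PySem.Int.toChars 0).length = 1 := by decide
      rw [ht] at this
      simp at this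
      omega
    · intro h
      exact absurd (isDouble_pos h) (by omega)
  · have hm : 0 < c.toNat := by omega
    have hcs : PySem.Int.toChars c = ((Nat.digits 10 c.toNat).map Nat.digitChar).reverse := by
      rw [PySem.Int.toChars, if_neg (by omega), toDigits10 _ hm]
    rw [hcs, rev_map_double_iff _ (fun x hx => Nat.digits_lt_base (by norm_num) hx),
      digits_double_iff _ hm]
    have : ((c.toNat : ℕ) : Int) = c := by omega
    rw [this]

-- lower bound for a doubled number
theorem low_bound (k : ℕ) (hk : 1 ≤ k) (n : ℕ) (hlo : 10 ^ (k - 1) ≤ n) :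
    (10 : Int) ^ (2 * k - 1) < (n : Int) * ((10 : Int) ^ k + 1) := by
  have h1 : ((10 : Int) ^ (k - 1)) ≤ (n : Int) := by exact_mod_cast hlo
  have h2 : (10 : Int) ^ (k - 1) * ((10 : Int) ^ k + 1) = 10 ^ (2 * k - 1) + 10 ^ (k - 1) := by
    rw [mul_add, mul_one, ← pow_add]
    congr 2
    omega
  have hp : (0 : Int) < 10 ^ k + 1 := by positivity
  nlinarith [pow_pos (show (0 : Int) < 10 by norm_num) (k - 1)]

theorem altList_mem (s e : Int) (k0 : Nat) (c : Int) :
    c ∈ altList s e k0 ↔ s ≤ c ∧ c ≤ e ∧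
      ∃ k n : ℕ, k0 ≤ k ∧ 10 ^ (k - 1) ≤ n ∧ n < 10 ^ k ∧ c = (n : Int) * ((10 : Int) ^ k + 1) := by
  fun_induction altList s e k0 with
  | case1 k hg p lo hi ih =>
    have hpd : p = (10:Int) ^ k + 1 := rfl
    have hlod : lo = max ((10:Int) ^ (k - 1)) (-(PySem.Int.floordiv (-s) ((10:Int) ^ k + 1))) := rfl
    have hhid : hi = min ((10:Int) ^ k - 1) (PySem.Int.floordiv e ((10:Int) ^ k + 1)) := rfl
    rw [List.mem_append, ih, List.mem_map, hpd, hlod, hhid]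
    have hp : (0 : Int) < 10 ^ k + 1 := by positivity
    have hceil := (PySem.Int.neg_floordiv_neg_eq_iff_of_pos (a := s) (b := (10:Int) ^ k + 1) hp).mp rfl
    constructor
    · rintro (⟨q, hq, rfl⟩ | ⟨hs, he, k', n, hk', hlo', hhi', hc⟩)
      · rw [PySem.List.mem_pyRange_one] at hq
        obtain ⟨hql, hqh⟩ := hq
        have hq10 : (10 : Int) ^ (k - 1) ≤ q := le_trans (le_max_left _ _) hql
        have hk1 : 1 ≤ k := by
          by_contra hk0
          have hz : k = 0 := by omega
          subst hz
          have h1 : q ≤ (10:Int) ^ 0 - 1 := by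
            have := min_le_left ((10:Int) ^ 0 - 1) (PySem.Int.floordiv e ((10:Int) ^ 0 + 1))
            omega
          norm_num at h1 hq10
          omega
        have hq0 : 0 ≤ q := le_trans (by positivity) hq10
        refine ⟨?_, ?_, k, q.toNat, le_rfl, ?_, ?_, ?_⟩
        · -- s ≤ q * p
          have h1 : -(PySem.Int.floordiv (-s) ((10:Int) ^ k + 1)) ≤ q := le_trans (le_max_right _ _) hql
          calc s ≤ -(PySem.Int.floordiv (-s) ((10:Int) ^ k + 1)) * ((10:Int) ^ k + 1) := hceil.2
          _ ≤ q * ((10:Int) ^ k + 1) := by nlinarith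
        · -- q * p ≤ e
          have h1 : q ≤ PySem.Int.floordiv e ((10:Int) ^ k + 1) := by
            have := min_le_right ((10:Int) ^ k - 1) (PySem.Int.floordiv e ((10:Int) ^ k + 1))
            omega
          exact (PySem.Int.le_floordiv_iff_mul_le hp).mp h1
        · -- digit lower bound
          have : ((10 ^ (k - 1) : ℕ) : Int) ≤ q := by push_cast; exact hq10
          omega
        · -- digit upper bound
          have h1 : q ≤ (10:Int) ^ k - 1 := by
            have := min_le_left ((10:Int) ^ k - 1) (PySem.Int.floordiv e ((10:Int) ^ k + 1))
            omega
          have : q < ((10 ^ k : ℕ) : Int) := by push_cast; omega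
          omega
        · rw [Int.toNat_of_nonneg hq0]
      · exact ⟨hs, he, k', n, by omega, hlo', hhi', hc⟩
    · rintro ⟨hs, he, k', n, hk', hlo', hhi', hc⟩
      by_cases hkk : k' = k
      · subst hkk
        left
        refine ⟨(n : Int), ?_, by rw [hc]⟩
        rw [PySem.List.mem_pyRange_one]
        have hk1 : 1 ≤ k' := by
          by_contra hk0
          have : k' = 0 := by omega
          subst this
          simp at hlo' hhi'
          omega
        have hlo'' : (10 : Int) ^ (k' - 1) ≤ (n : Int) := by exact_mod_cast hlo'
        have hhi'' : (n : Int) < (10 : Int) ^ k' := by exact_mod_cast hhi'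
        constructor
        · -- lo ≤ n
          refine max_le hlo'' ?_
          -- ceil ≤ n from s ≤ n*p
          have h1 : (-(PySem.Int.floordiv (-s) ((10:Int) ^ k' + 1)) - 1) * ((10:Int) ^ k' + 1) < (n : Int) * ((10:Int) ^ k' + 1) := by
            calc (-(PySem.Int.floordiv (-s) ((10:Int) ^ k' + 1)) - 1) * ((10:Int) ^ k' + 1) < s := hceil.1
            _ ≤ (n : Int) * ((10:Int) ^ k' + 1) := by rw [← hc]; exact hs
          have := lt_of_mul_lt_mul_right h1 (le_of_lt hp)
          omega
        · -- n < hi + 1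
          have h1 : (n : Int) ≤ PySem.Int.floordiv e ((10:Int) ^ k' + 1) :=
            (PySem.Int.le_floordiv_iff_mul_le hp).mpr (by rw [← hc]; exact he)
          have h2 : (n : Int) ≤ (10:Int) ^ k' - 1 := by omega
          omega
      · right
        exact ⟨hs, he, k', n, by omega, hlo', hhi', hc⟩
  | case2 k hg =>
    simp only [List.not_mem_nil, false_iff]
    rintro ⟨hs, he, k', n, hk', hlo', hhi', hc⟩
    have hk1 : 1 ≤ k' := by
      by_contra hk0
      have : k' = 0 := by omega
      subst this
      simp at hlo' hhi'
      omega
    have h1 : (10 : Int) ^ (2 * k' - 1) < c := by rw [hc]; exact low_bound k' hk1 n hlo'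
    have h2 : (10 : Int) ^ (2 * k - 1) ≤ 10 ^ (2 * k' - 1) :=
      pow_le_pow_right₀ (by norm_num) (by omega)
    exact hg (by omega)

theorem pyRange_map_pairwise (lo p : Int) (b : Int) (hp : 0 < p) :
    (((PySem.List.pyRange lo b).map (fun n => n * p))).Pairwise (· < ·) := by
  rw [PySem.List.pyRange_one, List.map_map]
  refine List.Pairwise.map _ ?_ List.pairwise_lt_range
  intro a b hab
  simp only [Function.comp]
  have : lo + (a : Int) < lo + (b : Int) := by omega
  nlinarith

theorem altList_pairwise (s e : Int) (k0 : Nat) :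
    (altList s e k0).Pairwise (· < ·) := by
  fun_induction altList s e k0 with
  | case1 k hg p lo hi ih =>
    have hpd : p = (10:Int) ^ k + 1 := rfl
    rw [List.pairwise_append]
    refine ⟨pyRange_map_pairwise lo p (hi + 1) (by rw [hpd]; positivity), ih, ?_⟩
    intro x hx y hy
    rw [List.mem_map] at hx
    obtain ⟨q, hq, rfl⟩ := hx
    rw [PySem.List.mem_pyRange_one] at hq
    rw [altList_mem] at hy
    obtain ⟨_, _, k', n, hk', hlo', hhi', rfl⟩ := hy
    -- q * p ≤ 10^(2k) - 1 < 10^(2k'-1) < n * (10^k' + 1)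
    have hk1' : 1 ≤ k' := by
      by_contra hk0
      have hz : k' = 0 := by omega
      subst hz
      simp at hlo' hhi'
      omega
    have hhid : hi = min ((10:Int) ^ k - 1) (PySem.Int.floordiv e ((10:Int) ^ k + 1)) := rfl
    have hq1 : q ≤ (10:Int) ^ k - 1 := by
      have hq2 : q ≤ hi := by omega
      rw [hhid] at hq2
      have := min_le_left ((10:Int) ^ k - 1) (PySem.Int.floordiv e ((10:Int) ^ k + 1))
      omega
    have h2 : ((10:Int) ^ k - 1) * ((10:Int) ^ k + 1) = 10 ^ (2 * k) - 1 := by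
      have hh : (10 : Int) ^ (2 * k) = 10 ^ k * 10 ^ k := by rw [← pow_add]; congr 1; omega
      rw [hh]; ring
    have hppos : (0:Int) < 10 ^ k + 1 := by positivity
    have hx2 : q * p ≤ (10:Int) ^ (2 * k) - 1 := by
      rw [hpd, ← h2]
      nlinarith
    have hy1 : (10:Int) ^ (2 * k' - 1) < (n : Int) * ((10:Int) ^ k' + 1) := low_bound k' hk1' n hlo'
    have hm : (10:Int) ^ (2 * k) ≤ 10 ^ (2 * k' - 1) := pow_le_pow_right₀ (by norm_num) (by omega)
    omega
  | case2 k hg => exact List.Pairwise.nil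

theorem filter_pairwise (s e : Int) :
    ((PySem.List.pyRange s (e + 1)).filter predA).Pairwise (· < ·) := by
  refine List.Pairwise.filter _ ?_
  rw [PySem.List.pyRange_one]
  refine List.Pairwise.map _ ?_ List.pairwise_lt_range
  intro a b hab
  omega

-- ===== VERDICT (by name: the statement is the Claim_ definition above) =====
theorem find_invalid_ids_spec : Claim_equal_find_invalid_ids := by
  intro s e _
  show find_invalid_ids s e = find_invalid_ids_alt s e
  rw [A_eq_filter, find_invalid_ids_alt, pvAltLoop_eq_altList, List.nil_append]
  have hA := filter_pairwise s e
  have hB := altList_pairwise s e 1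
  refine List.Perm.eq_of_pairwise (fun a b _ _ hab hba => by omega) hA hB ?_
  rw [List.perm_ext_iff_of_nodup (hA.imp ne_of_lt) (hB.imp ne_of_lt)]
  intro c
  rw [List.mem_filter, PySem.List.mem_pyRange_one, altList_mem, predA_iff_isDouble]
  unfold isDouble
  constructor
  · rintro ⟨⟨h1, h2⟩, k, n, hk, hlo, hhi, hc⟩
    exact ⟨h1, by omega, k, n, hk, hlo, hhi, hc⟩
  · rintro ⟨h1, h2, k, n, hk, hlo, hhi, hc⟩
    exact ⟨⟨h1, by omega⟩, k, n, hk, hlo, hhi, hc⟩
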